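-- pv_equiv track=rewrite | github.com/bgalvan1277/tradingagents-dashboard | app/services/runner.py | extract_one_line_thesis
-- ===== SOURCE A (Python) =====
-- def extract_one_line_thesis(final_decision: str) -> str:
--     """Extract a one-line thesis from the PM's decision text.
--
--     Looks for common patterns in the structured output: a line starting with
--     "Thesis:", "Summary:", "Rationale:", or actionable section headings like
--     "Actionable Execution", "Decisive Action Plan", "Portfolio Directive".
--     Falls back to the first substantive sentence that isn't a redundant label.
--     """
--     if not final_decision:
--         return ""
--
--     lines = final_decision.strip().split("\n")
--
--     # Pass 1: Look for labeled thesis/summary/rationale lines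
--     for line in lines:
--         stripped = line.strip().lstrip("*#- ")
--         lower = stripped.lower()
--         for prefix in ["thesis:", "summary:", "rationale:", "recommendation:"]:
--             if lower.startswith(prefix):
--                 thesis = stripped[len(prefix):].strip().lstrip("*: ")
--                 if len(thesis) > 10 and not thesis.lower().startswith("final trading decision"):
--                     return thesis[:300]
--
--     # Pass 2: Look for actionable section headings and grab the first sentence after
--     action_headings = [
--         "actionable execution", "decisive action plan", "decisive action",
--         "portfolio directive", "recommended action", "action plan",
--         "immediate action", "position action", "trade action",
--     ]
--     in_action_section = False
--     for line in lines:
--         stripped = line.strip().lstrip("*#- ")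
--         lower = stripped.lower()
--         if any(h in lower for h in action_headings):
--             in_action_section = True
--             continue
--         if in_action_section:
--             cleaned = stripped.lstrip("*#-•· ").rstrip("*")
--             if len(cleaned) > 15 and not cleaned.lower().startswith("final trading decision"):
--                 return cleaned[:300]
--             if stripped == "" or stripped.startswith("#"):
--                 in_action_section = False
--
--     # Pass 3: Fallback to first substantive line that isn't redundant
--     for line in lines:
--         stripped = line.strip().lstrip("*#- ")
--         if (
--             len(stripped) > 20
--             and not stripped.startswith("Rating")
--             and not stripped.lower().startswith("final trading decision")
--             and not stripped.lower().startswith("decision:")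
--         ):
--             return stripped[:300]
--
--     return final_decision[:300]
-- ===== SOURCE B (Python) =====
-- LABELS = ("thesis:", "summary:", "rationale:", "recommendation:")
--
-- ACTION_HEADINGS = (
--     "actionable execution", "decisive action plan", "decisive action",
--     "portfolio directive", "recommended action", "action plan",
--     "immediate action", "position action", "trade action",
-- )
--
--
-- def extract_one_line_thesis(final_decision: str) -> str:
--     """Single prioritized pass: keep the first candidate of each priority level
--     (labeled line > line after an action heading > substantive fallback) and
--     pick the best one at the end."""
--     if not final_decision:
--         return ""
--
--     labeled = after_heading = fallback = None
--     in_action = False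
--
--     for line in final_decision.strip().split("\n"):
--         stripped = line.strip().lstrip("*#- ")
--         lower = stripped.lower()
--
--         # priority 1: labeled thesis/summary/rationale/recommendation line
--         if labeled is None:
--             for prefix in LABELS:
--                 if lower.startswith(prefix):
--                     thesis = stripped[len(prefix):].strip().lstrip("*: ")
--                     if len(thesis) > 10 and not thesis.lower().startswith("final trading decision"):
--                         labeled = thesis[:300]
--                         break
--
--         # priority 2: first sentence after an action-section heading
--         if any(h in lower for h in ACTION_HEADINGS):
--             in_action = True
--         elif in_action:
--             if after_heading is None:
--                 cleaned = stripped.lstrip("*#-\u2022\u00b7 ").rstrip("*")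
--                 if len(cleaned) > 15 and not cleaned.lower().startswith("final trading decision"):
--                     after_heading = cleaned[:300]
--             if after_heading is None and (stripped == "" or stripped.startswith("#")):
--                 in_action = False
--
--         # priority 3: first substantive non-redundant line
--         if fallback is None and (
--             len(stripped) > 20
--             and not stripped.startswith("Rating")
--             and not lower.startswith("final trading decision")
--             and not lower.startswith("decision:")
--         ):
--             fallback = stripped[:300]
--
--     if labeled is not None:
--         return labeled
--     if after_heading is not None:
--         return after_heading
--     if fallback is not None:
--         return fallback
--     return final_decision[:300]
-- ===== Notes on version B (the rewrite author's own statement) =====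
-- stated objective: alternative
-- what changed: Replaces A's three sequential scans over the lines (labeled prefixes, then the action-section state machine, then the fallback) by one prioritized pass that keeps the first candidate of each priority level in its own variable and picks the best at the end.
import Mathlib
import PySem

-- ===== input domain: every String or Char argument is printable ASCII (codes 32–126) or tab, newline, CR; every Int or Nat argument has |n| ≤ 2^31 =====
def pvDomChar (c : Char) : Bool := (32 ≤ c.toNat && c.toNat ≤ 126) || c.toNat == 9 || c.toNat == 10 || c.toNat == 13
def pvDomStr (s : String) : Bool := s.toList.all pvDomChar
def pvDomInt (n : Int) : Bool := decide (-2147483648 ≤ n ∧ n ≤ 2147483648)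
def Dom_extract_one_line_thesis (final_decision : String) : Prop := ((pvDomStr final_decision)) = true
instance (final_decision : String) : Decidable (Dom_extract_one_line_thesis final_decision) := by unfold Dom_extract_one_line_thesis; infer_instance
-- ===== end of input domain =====

-- B replaces A's three sequential scans over the lines by a single prioritized scan that keeps
-- the first candidate of each priority level; same return value, one pass instead of three (objective: alternative).

-- shared primitive helpers (hand ports of Python built-ins PySem does not provide; exact on all inputs):
-- s.lstrip(chars) = drop leading characters that occur in chars
def pvLstrip (chars : List Char) (s : List Char) : List Char := s.dropWhile (fun c => chars.contains c)
-- s.rstrip(chars) = drop trailing characters that occur in chars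
def pvRstrip (chars : List Char) (s : List Char) : List Char := (s.reverse.dropWhile (fun c => chars.contains c)).reverse

-- line.strip().lstrip("*#- ")  (computed identically by both Pythons)
def pvStripped (l : List Char) : List Char := pvLstrip "*#- ".toList (PySem.Chars.strip l)

def pvLabels : List (List Char) := ["thesis:".toList, "summary:".toList, "rationale:".toList, "recommendation:".toList]

def pvHeadings : List (List Char) :=
  ["actionable execution".toList, "decisive action plan".toList, "decisive action".toList,
   "portfolio directive".toList, "recommended action".toList, "action plan".toList,
   "immediate action".toList, "position action".toList, "trade action".toList]

-- the inner 'for prefix in [...]' loop of pass 1 (identical code in A and in B)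
def pvLabelCand (prefixes : List (List Char)) (stripped : List Char) : Option (List Char) :=
  match prefixes with
  | [] => none
  | p :: ps =>
    if PySem.Chars.startswith (PySem.Chars.lower stripped) p then
      let thesis := pvLstrip "*: ".toList (PySem.Chars.strip (stripped.drop p.length))
      if 10 < thesis.length &&
          !(PySem.Chars.startswith (PySem.Chars.lower thesis) "final trading decision".toList) then
        some (thesis.take 300)
      else pvLabelCand ps stripped
    else pvLabelCand ps stripped

-- per-line candidate of pass 2's body (identical checks in A and in B)
def pvActionCand (stripped : List Char) : Option (List Char) :=
  let cleaned := pvRstrip ['*'] (pvLstrip "*#-•· ".toList stripped)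
  if 15 < cleaned.length &&
      !(PySem.Chars.startswith (PySem.Chars.lower cleaned) "final trading decision".toList) then
    some (cleaned.take 300)
  else none

-- per-line candidate of pass 3 (identical checks in A and in B)
def pvFallbackCand (stripped : List Char) : Option (List Char) :=
  if 20 < stripped.length &&
      !(PySem.Chars.startswith stripped "Rating".toList) &&
      !(PySem.Chars.startswith (PySem.Chars.lower stripped) "final trading decision".toList) &&
      !(PySem.Chars.startswith (PySem.Chars.lower stripped) "decision:".toList) then
    some (stripped.take 300)
  else none

-- ===== PORT A =====
-- pass 1: first labeled thesis/summary/rationale/recommendation line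
def pvPassA : List (List Char) → Option (List Char)
  | [] => none
  | l :: ls =>
    match pvLabelCand pvLabels (pvStripped l) with
    | some t => some t
    | none => pvPassA ls

-- pass 2: the in_action_section state machine
def pvPassB (flag : Bool) : List (List Char) → Option (List Char)
  | [] => none
  | l :: ls =>
    let stripped := pvStripped l
    if pvHeadings.any (fun h => PySem.Chars.isIn h (PySem.Chars.lower stripped)) then
      pvPassB true ls
    else if flag then
      match pvActionCand stripped with
      | some t => some t
      | none =>
        if stripped = [] || PySem.Chars.startswith stripped ['#'] then pvPassB false ls
        else pvPassB true ls
    else pvPassB flag ls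

-- pass 3: first substantive fallback line
def pvPassC : List (List Char) → Option (List Char)
  | [] => none
  | l :: ls =>
    match pvFallbackCand (pvStripped l) with
    | some t => some t
    | none => pvPassC ls

def extract_one_line_thesis (final_decision : String) : String :=
  if final_decision.toList = [] then "" else
  let lines := PySem.Chars.splitOn (PySem.Chars.strip final_decision.toList) "\n".toList
  match pvPassA lines with
  | some t => String.ofList t
  | none =>
    match pvPassB false lines with
    | some t => String.ofList t
    | none =>
      match pvPassC lines with
      | some t => String.ofList t
      | none => String.ofList (final_decision.toList.take 300)

-- ===== PORT B =====
-- the single loop of Source B: (labeled, after_heading, fallback, in_action) over the lines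
def pvLoop (a b c : Option (List Char)) (flag : Bool) :
    List (List Char) → Option (List Char) × Option (List Char) × Option (List Char)
  | [] => (a, b, c)
  | l :: ls =>
    let stripped := pvStripped l
    let a' := match a with
      | some _ => a
      | none => pvLabelCand pvLabels stripped
    let bf :=
      if pvHeadings.any (fun h => PySem.Chars.isIn h (PySem.Chars.lower stripped)) then
        (b, true)
      else if flag then
        let b2 := match b with
          | some _ => b
          | none => pvActionCand stripped
        let flag2 :=
          if b2 = none && (stripped = [] || PySem.Chars.startswith stripped ['#']) then false else true
        (b2, flag2)
      else (b, flag)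
    let c' := match c with
      | some _ => c
      | none => pvFallbackCand stripped
    pvLoop a' bf.1 c' bf.2 ls

def extract_one_line_thesis_alt (final_decision : String) : String :=
  if final_decision.toList = [] then "" else
  let lines := PySem.Chars.splitOn (PySem.Chars.strip final_decision.toList) "\n".toList
  match pvLoop none none none false lines with
  | (some t, _, _) => String.ofList t
  | (none, some t, _) => String.ofList t
  | (none, none, some t) => String.ofList t
  | (none, none, none) => String.ofList (final_decision.toList.take 300)

-- ===== PRECONDITION & SPEC =====
def Spec_extract_one_line_thesis (final_decision : String) (out : String) : Prop := out = extract_one_line_thesis_alt final_decision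
instance (final_decision : String) (out : String) : Decidable (Spec_extract_one_line_thesis final_decision out) := by unfold Spec_extract_one_line_thesis; infer_instance

-- ===== CLAIM (what is proved, stated in full; the proofs are below) =====
def Claim_equal_extract_one_line_thesis : Prop := ∀ (final_decision : String), Dom_extract_one_line_thesis final_decision → Spec_extract_one_line_thesis final_decision (extract_one_line_thesis final_decision)

-- ===== LEMMAS AND PROOFS =====

-- the loop invariant: B's single pass computes exactly A's three passes, each accumulator
-- absorbing with Option.or, and the flag machine of pass 2 advanced from the current state
theorem pvLoop_spec (ls : List (List Char)) : ∀ (a b c : Option (List Char)) (flag : Bool),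
    pvLoop a b c flag ls = (a.or (pvPassA ls), b.or (pvPassB flag ls), c.or (pvPassC ls)) := by
  induction ls with
  | nil => intro a b c flag; simp [pvLoop, pvPassA, pvPassB, pvPassC]
  | cons l ls ih =>
    intro a b c flag
    rw [pvLoop.eq_def]; simp only []; rw [ih]
    have ha : ∀ (a : Option (List Char)),
        (match a with | some _ => a | none => pvLabelCand pvLabels (pvStripped l)).or (pvPassA ls)
          = a.or (pvPassA (l :: ls)) := by
      intro a
      cases a <;> simp [pvPassA]
      cases pvLabelCand pvLabels (pvStripped l) <;> simp
    have hc : ∀ (c : Option (List Char)),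
        (match c with | some _ => c | none => pvFallbackCand (pvStripped l)).or (pvPassC ls)
          = c.or (pvPassC (l :: ls)) := by
      intro c
      cases c <;> simp [pvPassC]
      cases pvFallbackCand (pvStripped l) <;> simp
    rw [ha, hc]
    -- the pass-2 component
    by_cases hh : pvHeadings.any (fun h => PySem.Chars.isIn h (PySem.Chars.lower (pvStripped l))) = true
    · simp only [pvPassB, hh, if_pos]
    · rw [show pvPassB flag (l :: ls) = (if flag then
          match pvActionCand (pvStripped l) with
          | some t => some t
          | none =>
            if pvStripped l = [] || PySem.Chars.startswith (pvStripped l) ['#'] then pvPassB false ls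
            else pvPassB true ls
        else pvPassB flag ls) from by rw [pvPassB]; simp [hh]]
      simp only [hh, if_neg, Bool.false_eq_true, not_false_iff]
      cases flag with
      | false => simp
      | true =>
        simp only [if_pos]
        cases b with
        | some v => simp
        | none =>
          cases hcand : pvActionCand (pvStripped l) with
          | some v => simp
          | none =>
            simp only []
            by_cases hr : (pvStripped l = [] || PySem.Chars.startswith (pvStripped l) ['#']) = true
            · simp [hr]
            · simp [hr]

-- ===== VERDICT (by name: the statement is the Claim_ definition above) =====
theorem extract_one_line_thesis_spec : Claim_equal_extract_one_line_thesis := by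
  intro fd _
  unfold Spec_extract_one_line_thesis extract_one_line_thesis extract_one_line_thesis_alt
  by_cases h : fd.toList = []
  · simp [h]
  · simp only [h, if_false]
    rw [pvLoop_spec]
    simp only [Option.none_or]
    cases pvPassA (PySem.Chars.splitOn (PySem.Chars.strip fd.toList) "\n".toList) <;>
      cases pvPassB false (PySem.Chars.splitOn (PySem.Chars.strip fd.toList) "\n".toList) <;>
        cases pvPassC (PySem.Chars.splitOn (PySem.Chars.strip fd.toList) "\n".toList) <;> rfl
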